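-- pv_equiv track=rewrite | github.com/CCLab/RS_ref | rawsalad/papi/papi.py | build_idef_regexp
-- ===== SOURCE A (Python) =====
-- def build_idef_regexp( curr_idef ):
--     """ build regexp quering collection """
--     level_num= curr_idef.count('-')
--     if level_num > 0: # deeper than 'a'
--         idef_srch= curr_idef.rsplit('-', 1)[0]
--         lookup_idef= "^%s\-\d+$" % idef_srch
--         curr_idef= idef_srch
--         level= 1
--         while level < level_num:
--             idef_srch= curr_idef.rsplit('-', 1)[0]
--             lookup_idef += "|^%s\-\d+$" % idef_srch
--             curr_idef= idef_srch
--             level += 1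
--         lookup_idef += "|^([A-Z]|\d)+$"
--     else: # just query the highest level
--         lookup_idef= "^([A-Z]|\d)+$"
--
--     return lookup_idef
-- ===== SOURCE B (Python) =====
-- def build_idef_regexp(curr_idef):
--     """ build regexp quering collection """
--     # one left-to-right scan: collect the prefix before every '-', then
--     # emit the parent patterns longest-first and the top-level pattern
--     prefixes = []
--     prefix = ''
--     for ch in curr_idef:
--         if ch == '-':
--             prefixes.append(prefix)
--         prefix += ch
--     pats = ['^%s\\-\\d+$' % p for p in reversed(prefixes)]
--     pats.append('^([A-Z]|\\d)+$')
--     return '|'.join(pats)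
-- ===== Notes on version B (the rewrite author's own statement) =====
-- stated objective: alternative
-- what changed: replaces A's count-then-repeated-rsplit while loop with a single left-to-right scan that records the prefix before each dash, then joins the patterns (longest prefix first) plus the top-level pattern in one pass
import Mathlib
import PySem

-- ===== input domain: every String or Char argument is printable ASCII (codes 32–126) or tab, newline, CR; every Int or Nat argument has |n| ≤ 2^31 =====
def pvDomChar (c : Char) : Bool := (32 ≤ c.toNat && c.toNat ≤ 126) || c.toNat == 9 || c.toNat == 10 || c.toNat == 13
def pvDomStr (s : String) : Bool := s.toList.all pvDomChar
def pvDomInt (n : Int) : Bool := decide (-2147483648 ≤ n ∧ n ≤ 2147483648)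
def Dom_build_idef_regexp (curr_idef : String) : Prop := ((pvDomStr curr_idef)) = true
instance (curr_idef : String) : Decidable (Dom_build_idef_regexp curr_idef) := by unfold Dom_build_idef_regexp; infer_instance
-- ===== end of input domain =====

-- B replaces A's count-then-repeated-rsplit loop by a single left-to-right scan
-- collecting the prefix before each '-', then one join (alternative decomposition, same cost).


-- ===== PORT A =====
-- "^%s\-\d+$" % p  (the Python source's "\-\d+$" is the six characters \ - \ d + $)
def pat_a (p : List Char) : List Char := '^' :: p ++ ['\\', '-', '\\', 'd', '+', '$']

-- "^([A-Z]|\d)+$"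
def top_a : List Char := ['^', '(', '[', 'A', '-', 'Z', ']', '|', '\\', 'd', ')', '+', '$']

-- hand port of  s.rsplit('-', 1)[0]  (exact: the part before the LAST '-', or s itself if no '-')
def rsplit1head (cs : List Char) : List Char :=
  if '-' ∈ cs then ((cs.reverse.dropWhile (fun c => c ≠ '-')).drop 1).reverse else cs

-- the 'while level < level_num' loop of A, carrying (curr_idef, level, lookup_idef);
-- on exit A appends "|^([A-Z]|\d)+$"
def loopA (level_num : Nat) (curr : List Char) (level : Nat) (acc : List Char) : List Char :=
  if level < level_num then
    let idef_srch := rsplit1head curr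
    loopA level_num idef_srch (level + 1) (acc ++ '|' :: pat_a idef_srch)
  else acc ++ '|' :: top_a
termination_by level_num - level

def build_idef_regexp (curr_idef : String) : String :=
  let level_num := PySem.Str.count curr_idef "-"
  if 0 < level_num then
    let idef_srch := rsplit1head curr_idef.toList
    String.ofList (loopA level_num idef_srch 1 (pat_a idef_srch))
  else
    String.ofList top_a

-- ===== PORT B =====
def pat_b (p : List Char) : List Char := '^' :: p ++ ['\\', '-', '\\', 'd', '+', '$']

def top_b : List Char := ['^', '(', '[', 'A', '-', 'Z', ']', '|', '\\', 'd', ')', '+', '$']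

-- one scan step: record the running prefix when a '-' is seen, then extend the prefix
def stepB (st : List (List Char) × List Char) (c : Char) : List (List Char) × List Char :=
  (if c = '-' then st.1 ++ [st.2] else st.1, st.2 ++ [c])

def build_idef_regexp_alt (curr_idef : String) : String :=
  let st := curr_idef.toList.foldl stepB ([], [])
  let pats := st.1.reverse.map pat_b ++ [top_b]
  String.ofList (PySem.Chars.join ['|'] pats)

-- ===== PRECONDITION & SPEC =====
def Spec_build_idef_regexp (curr_idef : String) (out : String) : Prop := out = build_idef_regexp_alt curr_idef
instance (curr_idef : String) (out : String) : Decidable (Spec_build_idef_regexp curr_idef out) := by unfold Spec_build_idef_regexp; infer_instance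

-- ===== CLAIM (what is proved, stated in full; the proofs are below) =====
def Claim_equal_build_idef_regexp : Prop := ∀ (curr_idef : String), Dom_build_idef_regexp curr_idef → Spec_build_idef_regexp curr_idef (build_idef_regexp curr_idef)

-- ===== LEMMAS AND PROOFS =====

theorem foldB_snd (l : List Char) (parts : List (List Char)) (pref : List Char) :
    (List.foldl stepB (parts, pref) l).2 = pref ++ l := by
  induction l generalizing parts pref with
  | nil => simp
  | cons c t ih => simp [stepB, ih]

theorem foldB_no_dash (l : List Char) (parts : List (List Char)) (pref : List Char)
    (h : '-' ∉ l) : (List.foldl stepB (parts, pref) l).1 = parts := by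
  induction l generalizing parts pref with
  | nil => rfl
  | cons c t ih =>
    have hc : c ≠ '-' := fun hh => h (hh ▸ List.mem_cons_self)
    simp only [List.foldl_cons, stepB, if_neg hc]
    exact ih parts (pref ++ [c]) (fun hm => h (List.mem_cons_of_mem _ hm))

-- last-dash decomposition: cs = rsplit1head cs ++ '-' :: tail, with no '-' in tail
theorem rsplit1head_decomp (cs : List Char) (h : '-' ∈ cs) :
    cs = rsplit1head cs ++ '-' :: (cs.reverse.takeWhile (fun c => c ≠ '-')).reverse ∧
      '-' ∉ (cs.reverse.takeWhile (fun c => c ≠ '-')).reverse := by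
  have hr : '-' ∈ cs.reverse := List.mem_reverse.mpr h
  have hsplit := List.takeWhile_append_dropWhile (p := fun c => decide (c ≠ '-')) (l := cs.reverse)
  have hd : cs.reverse.dropWhile (fun c => decide (c ≠ '-')) ≠ [] := by
    intro hnil
    have htw : List.takeWhile (fun c => decide (c ≠ '-')) cs.reverse = cs.reverse := by
      conv_rhs => rw [← hsplit, hnil, List.append_nil]
    have := List.takeWhile_eq_self_iff.mp htw '-' hr
    simp at this
  have hcons : cs.reverse.dropWhile (fun c => decide (c ≠ '-')) =
      '-' :: (cs.reverse.dropWhile (fun c => decide (c ≠ '-'))).tail := by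
    have hhead := List.head_dropWhile_not (p := fun c => decide (c ≠ '-')) (l := cs.reverse) hd
    obtain ⟨a, t, hat⟩ := List.exists_cons_of_ne_nil hd
    have ha : a = '-' := by
      have h2 := hhead
      simp only [hat, List.head_cons] at h2
      simpa using h2
    rw [hat, ha]
    rfl
  constructor
  · have : rsplit1head cs = ((cs.reverse.dropWhile (fun c => c ≠ '-')).drop 1).reverse := by
      simp [rsplit1head, h]
    rw [this]
    conv_lhs => rw [← List.reverse_reverse cs, ← hsplit]
    rw [List.reverse_append]
    conv_lhs => rw [hcons]
    simp [List.drop_one]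
  · intro hm
    have := List.mem_takeWhile_imp (List.mem_reverse.mp hm)
    simp at this

theorem count_rsplit1head (cs : List Char) (h : '-' ∈ cs) :
    (rsplit1head cs).count '-' + 1 = cs.count '-' := by
  obtain ⟨hdec, hno⟩ := rsplit1head_decomp cs h
  have ht : (cs.reverse.takeWhile (fun c => c ≠ '-')).reverse.count '-' = 0 :=
    List.count_eq_zero.mpr hno
  conv_rhs => rw [hdec]
  rw [List.count_append, List.count_cons_self]
  omega

theorem parts_eq (cs : List Char) (h : '-' ∈ cs) :
    (List.foldl stepB ([], []) cs).1 =
      (List.foldl stepB ([], []) (rsplit1head cs)).1 ++ [rsplit1head cs] := by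
  obtain ⟨hdec, hno⟩ := rsplit1head_decomp cs h
  conv_lhs => rw [hdec]
  rw [List.foldl_append]
  have hst : List.foldl stepB ([], []) (rsplit1head cs) =
      ((List.foldl stepB ([], []) (rsplit1head cs)).1, rsplit1head cs) := by
    have := foldB_snd (rsplit1head cs) [] []
    simp at this
    exact Prod.ext rfl this
  rw [hst]
  simp only [List.foldl_cons, stepB, if_pos]
  exact foldB_no_dash _ _ _ hno

theorem countgo_eq (fuel : Nat) (l : List Char) (acc : Nat) (h : l.length ≤ fuel) :
    PySem.Chars.count.go ['-'] fuel l acc = acc + l.count '-' := by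
  induction fuel generalizing l acc with
  | zero =>
    have : l = [] := List.eq_nil_of_length_eq_zero (Nat.le_zero.mp h)
    subst this; simp [PySem.Chars.count.go]
  | succ f ih =>
    cases l with
    | nil => simp [PySem.Chars.count.go]
    | cons c t =>
      rw [PySem.Chars.count.go]
      by_cases hc : c = '-'
      · subst hc
        have hp : List.isPrefixOf ['-'] ('-' :: t) = true := by
          simp [List.isPrefixOf]
        rw [if_pos hp]
        simp only [List.length_singleton, List.drop_one, List.tail_cons]
        rw [ih t (acc + 1) (by simpa using Nat.lt_succ_iff.mp (by simpa using h))]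
        simp
        omega
      · have hp : List.isPrefixOf ['-'] (c :: t) = false := by
          simp [List.isPrefixOf]
          exact fun hh => hc hh.symm
        rw [if_neg (by simp [hp])]
        rw [ih t acc (by simpa using Nat.lt_succ_iff.mp (by simpa using h))]
        simp [hc]
theorem strcount_eq (s : String) : PySem.Str.count s "-" = s.toList.count '-' := by
  rw [PySem.Str.count_eq]
  show PySem.Chars.count s.toList ['-'] = _
  rw [PySem.Chars.count]
  simp [countgo_eq s.length s.toList 0 (by simp)]

theorem join_cons (l : List (List Char)) (x : List Char) :
    PySem.Chars.join ['|'] (x :: l) = x ++ l.flatMap (fun y => '|' :: y) := by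
  induction l generalizing x with
  | nil => simp [PySem.Chars.join, List.intercalate]
  | cons y t ih =>
    rw [PySem.Chars.join_cons_cons, ih y]
    simp

theorem loopA_eq (m : Nat) : ∀ (curr acc : List Char) (lv : Nat), curr.count '-' = m →
    loopA (lv + m) curr lv acc =
      acc ++ ((List.foldl stepB ([], []) curr).1.reverse.flatMap (fun p => '|' :: pat_a p))
          ++ '|' :: top_a := by
  induction m with
  | zero =>
    intro curr acc lv hc
    rw [loopA]
    have hno : '-' ∉ curr := by
      intro hm
      have := List.count_pos_iff.mpr hm
      omega
    simp [foldB_no_dash curr [] [] hno]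
  | succ n ih =>
    intro curr acc lv hc
    have hmem : '-' ∈ curr := by
      by_contra hno
      rw [List.count_eq_zero.mpr hno] at hc
      omega
    rw [loopA, if_pos (by omega)]
    have hcnt : (rsplit1head curr).count '-' = n := by
      have := count_rsplit1head curr hmem
      omega
    have := ih (rsplit1head curr) (acc ++ '|' :: pat_a (rsplit1head curr)) (lv + 1) hcnt
    rw [show lv + 1 + n = lv + (n + 1) by omega] at this
    rw [this, parts_eq curr hmem]
    simp

theorem build_idef_regexp_eq (s : String) :
    build_idef_regexp s = build_idef_regexp_alt s := by
  unfold build_idef_regexp build_idef_regexp_alt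
  dsimp only
  rw [strcount_eq]
  set cs := s.toList with hcs
  by_cases h0 : 0 < cs.count '-'
  · rw [if_pos h0]
    have hmem : '-' ∈ cs := List.count_pos_iff.mp h0
    have hcnt : (rsplit1head cs).count '-' + 1 = cs.count '-' := count_rsplit1head cs hmem
    have hloop := loopA_eq ((rsplit1head cs).count '-') (rsplit1head cs)
      (pat_a (rsplit1head cs)) 1 rfl
    rw [show 1 + (rsplit1head cs).count '-' = cs.count '-' by omega] at hloop
    rw [hloop, parts_eq cs hmem]
    rw [List.reverse_append]
    simp only [List.reverse_singleton, List.map_cons, List.map_append,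
      List.map_nil, List.cons_append]
    rw [join_cons]
    simp only [List.flatMap_append, List.flatMap_cons, List.flatMap_nil, List.flatMap_map,
      List.append_nil, List.append_assoc]
    rfl
  · rw [if_neg h0]
    have hno : '-' ∉ cs := by
      intro hm; exact h0 (List.count_pos_iff.mpr hm)
    rw [foldB_no_dash cs [] [] hno]
    simp [PySem.Chars.join, List.intercalate, top_a, top_b]

-- ===== VERDICT (by name: the statement is the Claim_ definition above) =====
theorem build_idef_regexp_spec : Claim_equal_build_idef_regexp := by
  intro s _
  unfold Spec_build_idef_regexp
  exact build_idef_regexp_eq s
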